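-- pv_equiv track=rewrite | github.com/pypi-data/pypi-mirror-285 | packages/harambe-sdk/harambe_sdk-0.15.5-py3-none-any.whl/harambe/normalize_url.py | find_highest_index_before_period
-- ===== SOURCE A (Python) =====
-- def find_highest_index_before_period(s: str, char: str) -> int:
--     """
--     Find the highest index of a specified character before the first period in a string.
--
--     :param s: The string to search.
--     :param char: The character to find.
--     :return: The highest index of the character before the first period, or -1
--     """
--     if not s.startswith("http:") and not s.startswith("https:"):
--         return -1
--
--     highest_index = -1
--     for i, c in enumerate(s):
--         if c == ".":
--             break
--         if c == char:
--             highest_index = i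
--     return highest_index
-- ===== SOURCE B (Python) =====
-- def find_highest_index_before_period(s: str, char: str) -> int:
--     if not s.startswith("http:") and not s.startswith("https:"):
--         return -1
--     end = s.find(".")
--     if end == -1:
--         end = len(s)
--     for i in range(end - 1, -1, -1):
--         if s[i] == char:
--             return i
--     return -1
-- ===== Notes on version B (the rewrite author's own statement) =====
-- stated objective: alternative
-- what changed: A scans forward over the whole string tracking the last index where the character matched; B locates the first period with str.find and then scans BACKWARD from it, returning at the first (= highest) match, so the accumulator disappears.
import Mathlib
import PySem

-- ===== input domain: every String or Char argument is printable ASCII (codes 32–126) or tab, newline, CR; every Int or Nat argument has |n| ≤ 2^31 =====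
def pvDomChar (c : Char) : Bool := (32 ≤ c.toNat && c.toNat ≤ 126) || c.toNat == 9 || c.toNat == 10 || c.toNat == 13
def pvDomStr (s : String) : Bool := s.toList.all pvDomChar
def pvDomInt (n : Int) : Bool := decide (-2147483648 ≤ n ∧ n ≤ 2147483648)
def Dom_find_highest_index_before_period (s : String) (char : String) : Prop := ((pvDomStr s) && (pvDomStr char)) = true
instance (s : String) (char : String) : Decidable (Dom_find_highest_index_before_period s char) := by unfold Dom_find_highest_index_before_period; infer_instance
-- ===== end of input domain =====

-- B replaces A's forward scan with a tracked last-match accumulator by a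
-- backward scan from the first period (found with str.find), returning at the
-- first match; same cost, different decomposition ("alternative").

-- ===== PORT A =====
-- the for-loop over enumerate(s): i is the running index, hi the accumulator;
-- 'c == "."' on the 1-char string c is the char test c = '.',
-- 'c == char' compares the 1-char string String.mk [c] with the parameter char
def pvALoop (char : String) : List Char → Nat → Int → Int
  | [], _, hi => hi
  | c :: rest, i, hi =>
      if c = '.' then hi
      else pvALoop char rest (i + 1) (if String.mk [c] = char then (i : Int) else hi)

def find_highest_index_before_period (s : String) (char : String) : Int :=
  if !(PySem.Str.startswith s "http:") && !(PySem.Str.startswith s "https:") then -1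
  else pvALoop char s.toList 0 (-1)

-- ===== PORT B =====
-- the 'for i in range(end-1, -1, -1)' loop: argument n = i+1, returns at the first match
def pvBScan (s : String) (char : String) : Nat → Int
  | 0 => -1
  | n + 1 =>
      if (PySem.Str.pyGet? s (n : Int)).map (fun c => String.mk [c]) = some char then (n : Int)
      else pvBScan s char n

def find_highest_index_before_period_alt (s : String) (char : String) : Int :=
  if !(PySem.Str.startswith s "http:") && !(PySem.Str.startswith s "https:") then -1
  else -- end = s.find("."); if end == -1: end = len(s)  (inlined into the loop bound)
    pvBScan s char (if PySem.Str.find s "." = -1 then (PySem.Str.len s : Int)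
                    else PySem.Str.find s ".").toNat

-- ===== PRECONDITION & SPEC =====
def Spec_find_highest_index_before_period (s : String) (char : String) (out : Int) : Prop := out = find_highest_index_before_period_alt s char
instance (s : String) (char : String) (out : Int) : Decidable (Spec_find_highest_index_before_period s char out) := by unfold Spec_find_highest_index_before_period; infer_instance

-- ===== CLAIM (what is proved, stated in full; the proofs are below) =====
def Claim_equal_find_highest_index_before_period : Prop := ∀ (s : String) (char : String), Dom_find_highest_index_before_period s char → Spec_find_highest_index_before_period s char (find_highest_index_before_period s char)

-- ===== LEMMAS AND PROOFS =====

-- index (as a Nat) of the LAST element of l satisfying P, none if there is none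
def pvLastIdx (P : Char → Prop) [DecidablePred P] : List Char → Option Nat
  | [] => none
  | c :: rest =>
      match pvLastIdx P rest with
      | some j => some (j + 1)
      | none => if P c then some 0 else none

theorem pvLastIdx_append_single (P : Char → Prop) [DecidablePred P] (l : List Char) (c : Char) :
    pvLastIdx P (l ++ [c]) = if P c then some l.length else pvLastIdx P l := by
  induction l with
  | nil => simp [pvLastIdx]
  | cons d t ih =>
      simp only [List.cons_append, pvLastIdx, ih, List.length_cons]
      split_ifs <;> cases h : pvLastIdx P t <;> simp

theorem pvALoop_eq (char : String) (cs : List Char) (i : Nat) (hi : Int) :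
    pvALoop char cs i hi =
      match pvLastIdx (fun c => String.mk [c] = char) (cs.takeWhile (· ≠ '.')) with
      | some j => ((i + j : Nat) : Int)
      | none => hi := by
  induction cs generalizing i hi with
  | nil => simp [pvALoop, pvLastIdx]
  | cons c rest ih =>
      by_cases hc : c = '.'
      · simp [pvALoop, hc, pvLastIdx, List.takeWhile]
      · rw [pvALoop, if_neg hc, ih]
        have ht : (c :: rest).takeWhile (· ≠ '.') = c :: rest.takeWhile (· ≠ '.') := by
          simp [hc]
        rw [ht, pvLastIdx]
        cases h : pvLastIdx (fun c => String.mk [c] = char) (rest.takeWhile (· ≠ '.')) with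
        | some j => push_cast; ring
        | none => split_ifs <;> simp

theorem pvBScan_eq (s char : String) (n : Nat) (hn : n ≤ s.toList.length) :
    pvBScan s char n =
      match pvLastIdx (fun c => String.mk [c] = char) (s.toList.take n) with
      | some j => (j : Int)
      | none => -1 := by
  induction n with
  | zero => simp [pvBScan, pvLastIdx]
  | succ m ih =>
      have hm : m < s.toList.length := hn
      have hget : s.toList[m]? = some s.toList[m] := List.getElem?_eq_getElem hm
      have htake : s.toList.take (m + 1) = s.toList.take m ++ [s.toList[m]] :=
        List.take_succ_eq_append_getElem hm
      rw [pvBScan]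
      simp only [PySem.Str.pyGet?_natCast, hget, Option.map_some, htake,
        pvLastIdx_append_single, Option.some.injEq]
      by_cases hP : String.mk [s.toList[m]] = char
      · have hml : m ≤ s.length := by rw [← String.length_toList]; omega
        simp [hP, List.length_take, hml]
      · rw [if_neg (by simpa using hP), ih (le_of_lt hm)]
        rw [if_neg hP]

theorem pv_singleton_prefix (a : Char) (l : List Char) : ([a] <+: l) ↔ l[0]? = some a := by
  cases l with
  | nil => simp
  | cons b t => simp [List.cons_prefix_cons, eq_comm]

theorem pv_takeWhile_eq_take (cs : List Char) (k : Nat)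
    (hlt : ∀ i < k, cs[i]? ≠ some '.') (hk : cs[k]? = some '.') :
    cs.takeWhile (· ≠ '.') = cs.take k := by
  induction cs generalizing k with
  | nil => simp at hk
  | cons c rest ih =>
      cases k with
      | zero =>
          simp only [List.getElem?_cons_zero, Option.some.injEq] at hk
          simp [hk]
      | succ m =>
          have hc : c ≠ '.' := by
            intro h
            exact hlt 0 (Nat.succ_pos m) (by simp [h])
          have := ih m (fun i hi => by
            have := hlt (i + 1) (by omega)
            simpa using this) (by simpa using hk)
          simp only [List.takeWhile_cons, show (decide (c ≠ '.')) = true by simp [hc],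
            List.take_succ_cons]
          simpa using this

theorem find_highest_index_before_period_spec : Claim_equal_find_highest_index_before_period := by
  intro s char _
  unfold Spec_find_highest_index_before_period
  unfold find_highest_index_before_period find_highest_index_before_period_alt
  by_cases hg : (!(PySem.Str.startswith s "http:") && !(PySem.Str.startswith s "https:")) = true
  · rw [if_pos hg, if_pos hg]
  · rw [if_neg hg, if_neg hg]
    rw [pvALoop_eq]
    have hsub : (".".toList : List Char) = ['.'] := rfl
    by_cases hf : PySem.Str.find s "." = -1
    · -- no period in s: both sides range over the whole string
      have hnin : ¬ (['.'] <:+: s.toList) := by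
        have := (PySem.Str.find_eq_neg_one_iff (s := s) (sub := ".")).mp hf
        simpa [hsub] using this
      have hmem : ('.' : Char) ∉ s.toList := by
        intro h
        obtain ⟨l₁, l₂, hsplit⟩ := List.append_of_mem h
        exact hnin ⟨l₁, l₂, by rw [hsplit]; simp⟩
      have htw : s.toList.takeWhile (· ≠ '.') = s.toList := by
        rw [List.takeWhile_eq_self_iff]
        intro c hc
        simp only [ne_eq, decide_eq_true_eq]
        intro h; exact hmem (h ▸ hc)
      have htn : (if PySem.Str.find s "." = -1 then (PySem.Str.len s : Int)
                  else PySem.Str.find s ".").toNat = s.toList.length := by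
        rw [if_pos hf]; simp [PySem.Str.len_eq]
      rw [htn, pvBScan_eq s char _ le_rfl, List.take_length, htw]
      cases pvLastIdx (fun c => String.mk [c] = char) s.toList <;> simp
    · -- a period exists: both sides stop at its (first) index k
      have hFeq : PySem.Str.find s "." = PySem.Chars.find s.toList ['.'] := by
        rw [PySem.Str.find_eq, hsub]
      have hnn : 0 ≤ PySem.Chars.find s.toList ['.'] := by
        rcases (PySem.Chars.neg_one_le_find (s := s.toList) (sub := ['.'])).lt_or_eq with h | h
        · omega
        · exact absurd (by rw [hFeq]; omega) hf
      obtain ⟨hpre, hmin⟩ := PySem.Chars.find_spec (s := s.toList) (sub := ['.']) hnn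
      have hkval : ((PySem.Chars.find s.toList ['.']).toNat : Int) = PySem.Chars.find s.toList ['.'] :=
        Int.toNat_of_nonneg hnn
      generalize hkdef : (PySem.Chars.find s.toList ['.']).toNat = k at hpre hmin hkval
      have hkget : s.toList[k]? = some '.' := by
        have := (pv_singleton_prefix '.' (s.toList.drop k)).mp hpre
        simpa [List.getElem?_drop] using this
      have hltget : ∀ i < k, s.toList[i]? ≠ some '.' := by
        intro i hi hcon
        exact hmin i hi ((pv_singleton_prefix '.' (s.toList.drop i)).mpr
          (by simpa [List.getElem?_drop] using hcon))
      have hklen : k ≤ s.toList.length := by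
        rcases List.getElem?_eq_some_iff.mp hkget with ⟨h, _⟩
        omega
      have htw := pv_takeWhile_eq_take s.toList k hltget hkget
      have htn : (if PySem.Str.find s "." = -1 then (PySem.Str.len s : Int)
                  else PySem.Str.find s ".").toNat = k := by
        rw [if_neg hf, hFeq, ← hkval, Int.toNat_natCast]
      rw [htn, pvBScan_eq s char k hklen, htw]
      cases pvLastIdx (fun c => String.mk [c] = char) (s.toList.take k) <;> simp
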